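-- pv_equiv track=rewrite | github.com/agentcoinorg/predictionprophet | prediction_prophet/autonolas/research.py | concatenate_short_sentences
-- ===== SOURCE A (Python) =====
-- def concatenate_short_sentences(sentences: list[str], len_sentence_threshold: int) -> list[str]:
--     modified_sentences: list[str] = []
--     i = 0
--     while i < len(sentences):
--         sentence = sentences[i]
--         word_count = len(sentence.split())
--
--         # Check if the sentence is shorter than the threshold
--         while word_count < len_sentence_threshold:
--             i += 1
--             # Break the loop if we reach the end of the list
--             if i >= len(sentences):
--                 break
--             next_sentence = sentences[i]
--             sentence += " " + next_sentence
--             word_count += len(next_sentence.split())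
--
--         modified_sentences.append(sentence)
--         i += 1
--
--     return modified_sentences
-- ===== SOURCE B (Python) =====
-- def concatenate_short_sentences(sentences: list[str], len_sentence_threshold: int) -> list[str]:
--     result: list[str] = []
--     rest = sentences
--     while rest:
--         # length k of the first greedy group, computed from word counts alone
--         total = len(rest[0].split())
--         k = 1
--         while total < len_sentence_threshold and k < len(rest):
--             total += len(rest[k].split())
--             k += 1
--         result.append(" ".join(rest[:k]))
--         rest = rest[k:]
--     return result
-- ===== Notes on version B (the rewrite author's own statement) =====
-- stated objective: alternative
-- what changed: Instead of A's index-driven nested while-loops that grow each group string by repeated '+='-concatenation, B repeatedly strips one greedy group off the front of the remainder: it determines the group's length k from word counts alone, emits ' '.join(rest[:k]), and continues with rest[k:].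
import Mathlib
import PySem

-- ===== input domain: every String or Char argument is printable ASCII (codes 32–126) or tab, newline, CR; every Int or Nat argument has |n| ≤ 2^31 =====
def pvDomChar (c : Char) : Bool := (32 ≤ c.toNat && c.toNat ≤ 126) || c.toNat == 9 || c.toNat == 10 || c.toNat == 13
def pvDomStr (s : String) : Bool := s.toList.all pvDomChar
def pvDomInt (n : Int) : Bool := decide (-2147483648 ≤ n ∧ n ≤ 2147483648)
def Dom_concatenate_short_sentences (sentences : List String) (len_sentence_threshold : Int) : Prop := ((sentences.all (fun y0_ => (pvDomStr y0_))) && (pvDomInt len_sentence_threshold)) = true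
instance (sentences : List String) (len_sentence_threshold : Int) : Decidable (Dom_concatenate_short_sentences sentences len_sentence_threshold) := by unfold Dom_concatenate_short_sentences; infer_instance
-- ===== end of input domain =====

-- B replaces A's index-driven nested while-loops (growing a group string by repeated
-- concatenation) with group-stripping: find the first group's length k from word counts
-- alone, emit " ".join(rest[:k]), continue on rest[k:]; objective: alternative.

-- ===== PORT A =====
-- len(sentence.split()) as an Int
def csWcA (s : String) : Int := ((PySem.Str.split₀ s).length : Int)

-- inner 'while word_count < len_sentence_threshold' loop; fuel only makes the recursion
-- structural (fuel ≥ sentences.length - i at every call, so the 0-branch is never reached);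
-- returns (sentence, i) where i is the index of the last consumed sentence (or length after break)
def csInnerA (sentences : List String) (thr : Int) :
    Nat → Nat → String → Int → String × Nat
  | 0, i, sentence, _ => (sentence, i)
  | fuel + 1, i, sentence, wc =>
    if wc < thr then
      if sentences.length ≤ i + 1 then (sentence, i + 1)
      else
        let next := (PySem.List.pyGet? sentences ((i + 1 : Nat) : Int)).getD ""
        csInnerA sentences thr fuel (i + 1) (sentence ++ " " ++ next) (wc + csWcA next)
    else (sentence, i)

-- outer 'while i < len(sentences)' loop, same fuel discipline
def csOuterA (sentences : List String) (thr : Int) :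
    Nat → Nat → List String → List String
  | 0, _, acc => acc
  | fuel + 1, i, acc =>
    if i < sentences.length then
      let sentence := (PySem.List.pyGet? sentences ((i : Nat) : Int)).getD ""
      let r := csInnerA sentences thr sentences.length i sentence (csWcA sentence)
      csOuterA sentences thr fuel (r.2 + 1) (acc ++ [r.1])
    else acc

def concatenate_short_sentences (sentences : List String) (len_sentence_threshold : Int) :
    List String :=
  csOuterA sentences len_sentence_threshold sentences.length 0 []

-- ===== PORT B =====
def csWcB (s : String) : Int := ((PySem.Str.split₀ s).length : Int)

-- B's inner 'while total < len_sentence_threshold and k < len(rest)' loop; fuel-structural as for A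
def csLoopB (sentences : List String) (thr : Int) :
    Nat → Nat → Int → Nat
  | 0, k, _ => k
  | fuel + 1, k, total =>
    if total < thr ∧ k < sentences.length then
      csLoopB sentences thr fuel (k + 1)
        (total + csWcB ((PySem.List.pyGet? sentences ((k : Nat) : Int)).getD ""))
    else k

-- cited by the port's decreasing_by
theorem csLoopB_ge (sentences : List String) (thr : Int) :
    ∀ (fuel k : Nat) (total : Int), k ≤ csLoopB sentences thr fuel k total := by
  intro fuel
  induction fuel with
  | zero => intro k total; simp [csLoopB]
  | succ f ih =>
    intro k total
    rw [csLoopB]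
    split
    · exact le_trans (by omega) (ih (k + 1) _)
    · exact le_rfl

-- B's outer 'while rest:' loop, transcribed as recursion on the remainder 'rest'
def concatenate_short_sentences_alt (sentences : List String) (len_sentence_threshold : Int) :
    List String :=
  match sentences with
  | [] => []
  | x :: xs =>
    let k := csLoopB (x :: xs) len_sentence_threshold (x :: xs).length 1 (csWcB x)
    PySem.Str.join " " (PySem.List.slice (x :: xs) none (some (k : Int))) ::
      concatenate_short_sentences_alt ((x :: xs).drop k) len_sentence_threshold
termination_by sentences.length
decreasing_by
  have h1 : 1 ≤ csLoopB (x :: xs) len_sentence_threshold (x :: xs).length 1 (csWcB x) :=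
    csLoopB_ge _ _ _ _ _
  rw [List.length_drop]
  exact Nat.sub_lt (by simp) (by omega)

-- ===== PRECONDITION & SPEC =====
def Spec_concatenate_short_sentences (sentences : List String) (len_sentence_threshold : Int) (out : List String) : Prop := out = concatenate_short_sentences_alt sentences len_sentence_threshold
instance (sentences : List String) (len_sentence_threshold : Int) (out : List String) : Decidable (Spec_concatenate_short_sentences sentences len_sentence_threshold out) := by unfold Spec_concatenate_short_sentences; infer_instance

-- ===== CLAIM (what is proved, stated in full; the proofs are below) =====
def Claim_equal_concatenate_short_sentences : Prop := ∀ (sentences : List String) (len_sentence_threshold : Int), Dom_concatenate_short_sentences sentences len_sentence_threshold → Spec_concatenate_short_sentences sentences len_sentence_threshold (concatenate_short_sentences sentences len_sentence_threshold)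

-- ===== LEMMAS AND PROOFS =====

-- reference greedy grouping, group kept as a string (A is reduced to this)
def csRef (thr : Int) (cur : String) (cnt : Int) : List String → List String
  | [] => [cur]
  | x :: xs =>
    if cnt < thr then csRef thr (cur ++ " " ++ x) (cnt + csWcB x) xs
    else cur :: csRef thr x (csWcB x) xs

-- reference greedy grouping, group kept as a list of sentences (B is reduced to this)
def csRefG (thr : Int) (g : List String) (cnt : Int) : List String → List (List String)
  | [] => [g]
  | x :: xs =>
    if cnt < thr then csRefG thr (g ++ [x]) (cnt + csWcB x) xs
    else g :: csRefG thr [x] (csWcB x) xs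

-- groups of a whole list
def csG (thr : Int) : List String → List (List String)
  | [] => []
  | x :: xs => csRefG thr [x] (csWcB x) xs

theorem charsJoin_snoc (sep c : List Char) :
    ∀ (l : List (List Char)), l ≠ [] →
      PySem.Chars.join sep (l ++ [c]) = PySem.Chars.join sep l ++ sep ++ c := by
  intro l
  induction l with
  | nil => simp
  | cons a t ih =>
    intro _
    cases t with
    | nil => simp [PySem.Chars.join_cons_cons, PySem.Chars.join_singleton]
    | cons b t' =>
      simp only [List.cons_append, PySem.Chars.join_cons_cons]
      rw [show b :: (t' ++ [c]) = (b :: t') ++ [c] from rfl, ih (by simp)]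
      simp [List.append_assoc]

theorem csJoin_snoc (g : List String) (hg : g ≠ []) (y : String) :
    PySem.Str.join " " (g ++ [y]) = PySem.Str.join " " g ++ " " ++ y := by
  apply String.toList_injective
  simp only [PySem.Str.join, String.toList_ofList, List.map_append, List.map_cons, List.map_nil]
  rw [charsJoin_snoc _ _ _ (by simpa using hg)]
  simp

theorem csJoin_single (y : String) : PySem.Str.join " " [y] = y := by
  simp [PySem.Str.join, PySem.Chars.join_singleton]

theorem csRef_eq_map (thr : Int) :
    ∀ (ys g : List String) (cnt : Int), g ≠ [] →
      csRef thr (PySem.Str.join " " g) cnt ys = (csRefG thr g cnt ys).map (PySem.Str.join " ") := by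
  intro ys
  induction ys with
  | nil => intro g cnt _; simp [csRef, csRefG]
  | cons y ys ih =>
    intro g cnt hg
    simp only [csRef, csRefG]
    split
    · rw [← csJoin_snoc g hg y, ih (g ++ [y]) _ (by simp)]
    · rw [List.map_cons, ← ih [y] _ (by simp), csJoin_single]

theorem csLoopB_spec (sentences : List String) (thr : Int) :
    ∀ (fuel k : Nat) (total : Int), sentences.length - k ≤ fuel → 1 ≤ k → k ≤ sentences.length →
      csLoopB sentences thr fuel k total ≤ sentences.length ∧
      csRefG thr (sentences.take k) total (sentences.drop k)
        = sentences.take (csLoopB sentences thr fuel k total)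
            :: csG thr (sentences.drop (csLoopB sentences thr fuel k total)) := by
  intro fuel
  induction fuel with
  | zero =>
    intro k total hf h1 hk
    have hk' : k = sentences.length := by omega
    subst hk'
    simp [csLoopB, csRefG, csG]
  | succ f ih =>
    intro k total hf h1 hk
    rw [csLoopB]
    split
    · rename_i h
      have hklt : k < sentences.length := h.2
      have hget : (PySem.List.pyGet? sentences ((k : Nat) : Int)).getD "" = sentences[k] := by
        rw [PySem.List.pyGet?_natCast]
        simp [List.getElem?_eq_getElem hklt]
      have hdrop : sentences.drop k = sentences[k] :: sentences.drop (k + 1) :=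
        List.drop_eq_getElem_cons hklt
      have htake : sentences.take (k + 1) = sentences.take k ++ [sentences[k]] :=
        (List.take_succ_eq_append_getElem hklt)
      have hrec := ih (k + 1) (total + csWcB (sentences[k])) (by omega) (by omega) (by omega)
      rw [hget]
      refine ⟨hrec.1, ?_⟩
      rw [hdrop]
      simp only [csRefG, if_pos h.1]
      rw [← htake]
      exact hrec.2
    · rename_i h
      refine ⟨hk, ?_⟩
      by_cases hke : k = sentences.length
      · subst hke; simp [csRefG, csG]
      · have hklt : k < sentences.length := by omega
        have hnlt : ¬ total < thr := by tauto
        have hdrop : sentences.drop k = sentences[k] :: sentences.drop (k + 1) :=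
          List.drop_eq_getElem_cons hklt
        rw [hdrop]
        simp only [csRefG, if_neg hnlt]
        rfl

-- B equals the joined reference groups
theorem csB_eq (thr : Int) :
    ∀ (sentences : List String),
      concatenate_short_sentences_alt sentences thr = (csG thr sentences).map (PySem.Str.join " ") := by
  intro sentences
  induction hn : sentences.length using Nat.strong_induction_on generalizing sentences with
  | _ n ih =>
    cases sentences with
    | nil => simp [concatenate_short_sentences_alt, csG]
    | cons x xs =>
      rw [concatenate_short_sentences_alt]
      have hspec := csLoopB_spec (x :: xs) thr ((x :: xs).length) 1 (csWcB x)
        (by omega) (by omega) (by simp)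
      set k := csLoopB (x :: xs) thr ((x :: xs).length) 1 (csWcB x) with hkdef
      have hk1 : 1 ≤ k := csLoopB_ge _ _ _ _ _
      have hG : csG thr (x :: xs) = (x :: xs).take k :: csG thr ((x :: xs).drop k) := by
        rw [csG]
        have h1 : (x :: xs).take 1 = [x] := by simp
        have h2 : (x :: xs).drop 1 = xs := by simp
        rw [← h1, ← h2]
        exact hspec.2
      rw [hG, List.map_cons]
      have hslice : PySem.List.slice (x :: xs) none (some ((k : Nat) : Int)) = (x :: xs).take k :=
        PySem.List.slice_to_natCast _ _
      rw [hslice]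
      congr 1
      refine ih ((x :: xs).drop k).length ?_ _ rfl
      rw [List.length_drop]
      simp only [List.length_cons] at hn ⊢
      omega

theorem csA_outer_eq (sentences : List String) (thr : Int) :
    ∀ (n i fi fo : Nat) (cur : String) (cnt : Int) (acc : List String),
      sentences.length - i ≤ n → i < sentences.length →
      sentences.length - i ≤ fi → sentences.length - (i + 1) ≤ fo →
      csOuterA sentences thr fo ((csInnerA sentences thr fi i cur cnt).2 + 1)
          (acc ++ [(csInnerA sentences thr fi i cur cnt).1]) =
        acc ++ csRef thr cur cnt (sentences.drop (i + 1)) := by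
  intro n
  induction n with
  | zero => intro i fi fo cur cnt acc hn hi; omega
  | succ n ih =>
    intro i fi fo cur cnt acc hn hi hfi hfo
    obtain ⟨fi', rfl⟩ : ∃ k, fi = k + 1 := ⟨fi - 1, by omega⟩
    rw [csInnerA]
    by_cases hlt : cnt < thr
    · simp only [if_pos hlt]
      by_cases hend : sentences.length ≤ i + 1
      · simp only [if_pos hend]
        have hdrop : sentences.drop (i + 1) = [] := List.drop_eq_nil_of_le hend
        rw [hdrop]
        simp only [csRef]
        cases fo with
        | zero => rw [csOuterA]
        | succ f => rw [csOuterA]; simp [Nat.not_lt.mpr (by omega : sentences.length ≤ i + 1 + 1)]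
      · simp only [if_neg hend]
        have hi1 : i + 1 < sentences.length := by omega
        have hget : (PySem.List.pyGet? sentences (((i+1 : Nat)) : Int)).getD "" = sentences[i+1] := by
          rw [PySem.List.pyGet?_natCast]
          simp [List.getElem?_eq_getElem hi1]
        have hdrop : sentences.drop (i + 1) = sentences[i+1] :: sentences.drop (i + 2) :=
          List.drop_eq_getElem_cons hi1
        rw [hdrop]
        simp only [csRef, if_pos hlt]
        rw [hget]
        have := ih (i + 1) fi' fo (cur ++ " " ++ sentences[i+1]) (cnt + csWcB (sentences[i+1]))
          acc (by omega) hi1 (by omega) (by omega)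
        simpa [csWcA, csWcB] using this
    · simp only [if_neg hlt]
      by_cases hend : sentences.length ≤ i + 1
      · have hdrop : sentences.drop (i + 1) = [] := List.drop_eq_nil_of_le hend
        rw [hdrop]
        simp only [csRef]
        cases fo with
        | zero => rw [csOuterA]
        | succ f => rw [csOuterA]; simp [Nat.not_lt.mpr (by omega : sentences.length ≤ i + 1)]
      · have hi1 : i + 1 < sentences.length := by omega
        have hdrop : sentences.drop (i + 1) = sentences[i+1] :: sentences.drop (i + 2) :=
          List.drop_eq_getElem_cons hi1
        rw [hdrop]
        simp only [csRef, if_neg hlt]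
        obtain ⟨fo', rfl⟩ : ∃ k, fo = k + 1 := ⟨fo - 1, by omega⟩
        rw [csOuterA]
        simp only [if_pos hi1]
        have hget : (PySem.List.pyGet? sentences (((i+1 : Nat)) : Int)).getD "" = sentences[i+1] := by
          rw [PySem.List.pyGet?_natCast]
          simp [List.getElem?_eq_getElem hi1]
        simp only [hget]
        have := ih (i + 1) sentences.length fo' (sentences[i+1]) (csWcA (sentences[i+1]))
          (acc ++ [cur]) (by omega) hi1 (by omega) (by omega)
        simp only [csWcA, csWcB] at this ⊢
        rw [List.append_assoc] at this
        simpa using this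

-- ===== VERDICT (by name: the statement is the Claim_ definition above) =====
theorem concatenate_short_sentences_spec : Claim_equal_concatenate_short_sentences := by
  intro sentences thr _
  show concatenate_short_sentences sentences thr = concatenate_short_sentences_alt sentences thr
  rw [csB_eq]
  unfold concatenate_short_sentences
  cases sentences with
  | nil => simp [csOuterA, csG]
  | cons x xs =>
    have hlen : (x :: xs).length = xs.length + 1 := by simp
    rw [hlen, csOuterA]
    have h0 : 0 < (x :: xs).length := by simp
    simp only [if_pos h0]
    have hget : (PySem.List.pyGet? (x :: xs) ((0 : Nat) : Int)).getD "" = x := by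
      rw [PySem.List.pyGet?_natCast]; simp
    simp only [hget]
    have hA := csA_outer_eq (x :: xs) thr ((x :: xs).length) 0 ((x :: xs).length) xs.length
      x (csWcA x) [] (by omega) h0 (by omega) (by simp)
    simp only [List.nil_append, List.length_cons] at hA ⊢
    rw [hA]
    rw [csG]
    have hx : csRef thr x (csWcB x) xs
        = (csRefG thr [x] (csWcB x) xs).map (PySem.Str.join " ") := by
      have h := csRef_eq_map thr xs [x] (csWcB x) (by simp)
      rwa [csJoin_single] at h
    simp only [csWcA, csWcB] at hx ⊢
    exact hx
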